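-- pv_equiv track=rewrite | github.com/deevis/crypto_basis | generate_timeline_data.py | is_interesting_text
-- ===== SOURCE A (Python) =====
-- def is_interesting_text(content, file_type):
--     """
--     Determine if text content is interesting (human messages) vs technical/boring
--
--     Filters out:
--     - JSON data
--     - Binary/hex dumps
--     - Code-like content
--     - Very short messages (< 20 chars)
--     - Encoded/encrypted looking data
--     """
--     if not content or file_type != 'text':
--         return False
--
--     # Too short to be interesting
--     if len(content) < 20:
--         return False
--
--     # Looks like JSON (contains lots of braces and brackets together with colons)
--     # Note: Biblical text has colons for verses, so check for braces/brackets primarily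
--     json_indicators = content.count('{') + content.count('[') + (content.count('"') // 10)
--     if json_indicators > 5:
--         return False
--
--     # Check for high ratio of special characters (likely encoded/binary)
--     special_chars = sum(1 for c in content if not c.isalnum() and not c.isspace() and c not in '.,!?;:\'"()-')
--     if len(content) > 0 and (special_chars / len(content)) > 0.3:
--         return False
--
--     # Check for repetitive patterns (likely technical data)
--     if content.count('.') > len(content) / 10:  # Too many dots
--         return False
--
--     # Looks like hex or base64
--     hex_like = sum(1 for c in content if c in '0123456789abcdefABCDEF')
--     if len(content) > 0 and (hex_like / len(content)) > 0.7:
--         return False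
--
--     # Check for readable words (has vowels, normal word patterns)
--     vowels = sum(1 for c in content.lower() if c in 'aeiou')
--     if len(content) > 0 and (vowels / len(content)) < 0.1:  # Too few vowels
--         return False
--
--     # Passed all filters - looks like interesting human text!
--     return True
-- ===== SOURCE B (Python) =====
-- def is_interesting_text(content, file_type):
--     """Single-pass re-implementation: one scan of content accumulates every
--     quantity the original computes in separate passes; the same threshold
--     tests are then applied in the same order (ratio tests done in exact
--     integer arithmetic)."""
--     if not content or file_type != 'text':
--         return False
--     n = len(content)
--     if n < 20:
--         return False
--     braces = brackets = quotes = special = dots = hexd = vowels = 0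
--     for c in content:
--         if c == '{':
--             braces += 1
--         elif c == '[':
--             brackets += 1
--         elif c == '"':
--             quotes += 1
--         if not c.isalnum() and not c.isspace() and c not in ".,!?;:'\"()-":
--             special += 1
--         if c == '.':
--             dots += 1
--         if c in '0123456789abcdefABCDEF':
--             hexd += 1
--         if c.lower() in 'aeiou':
--             vowels += 1
--     if braces + brackets + quotes // 10 > 5:
--         return False
--     if special * 10 > 3 * n:
--         return False
--     if dots * 10 > n:
--         return False
--     if hexd * 10 > 7 * n:
--         return False
--     if vowels * 10 < n:
--         return False
--     return True
-- ===== Notes on version B (the rewrite author's own statement) =====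
-- stated objective: alternative
-- what changed: A makes seven separate passes over the content (three str.count calls plus four generator-sum scans, one interleaved with each threshold test); B scans the content exactly once, accumulating all seven counters in a single loop, and then applies the same threshold tests in the same order using exact integer arithmetic instead of float ratios.
import Mathlib
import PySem

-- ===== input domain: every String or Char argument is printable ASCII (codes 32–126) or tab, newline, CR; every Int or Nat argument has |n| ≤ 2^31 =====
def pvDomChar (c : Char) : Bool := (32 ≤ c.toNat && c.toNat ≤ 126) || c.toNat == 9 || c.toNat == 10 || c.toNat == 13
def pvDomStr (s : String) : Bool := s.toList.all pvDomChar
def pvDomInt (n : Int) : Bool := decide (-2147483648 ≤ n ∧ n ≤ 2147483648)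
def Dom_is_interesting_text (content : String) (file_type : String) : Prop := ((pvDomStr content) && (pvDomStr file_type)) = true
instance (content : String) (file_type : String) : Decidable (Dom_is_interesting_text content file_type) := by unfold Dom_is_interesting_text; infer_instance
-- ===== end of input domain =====

-- B replaces A's seven separate passes over the content by one single accumulating scan
-- followed by the same threshold tests in the same order (objective: alternative decomposition,
-- same asymptotic cost; ratio tests done in exact integer arithmetic).
-- Float-comparison note shared by both ports: Python's 'x/n > 0.3', 'x > n/10', 'x/n > 0.7',
-- 'x/n < 0.1' are ported as the integer tests '10*x > 3*n', '10*x > n', '10*x > 7*n',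
-- '10*x < n'; these agree with the IEEE-double comparisons for every string length
-- below ~10^15 characters (the nearest fraction p/q to 3/10 etc. with q that small lies
-- outside the rounding interval of the float literal).

-- shared character predicates (the same literal character tests both Pythons perform)
def pvSpecialChar (c : Char) : Bool :=
  !PySem.Chars.isalnum c && !PySem.Chars.isspace c && !(".,!?;:'\"()-".toList.contains c)
def pvHexChar (c : Char) : Bool := "0123456789abcdefABCDEF".toList.contains c
def pvVowelChar (c : Char) : Bool := "aeiou".toList.contains c

-- ===== PORT A =====
-- literal transliteration of A: guards, then one separate pass/count per quantity,
-- each followed immediately by its threshold test, in A's order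
def is_interesting_text (content : String) (file_type : String) : Bool :=
  if content == "" || file_type != "text" then false
  else if PySem.Str.len content < 20 then false
  else
    let json_indicators : Int :=
      (PySem.Str.count content "{" : Int) + (PySem.Str.count content "[" : Int)
        + PySem.Int.floordiv (PySem.Str.count content "\"" : Int) 10
    if json_indicators > 5 then false
    else
      let special_chars : Int :=
        content.toList.foldl (fun acc c => if pvSpecialChar c then acc + 1 else acc) 0
      if 0 < PySem.Str.len content ∧ special_chars * 10 > 3 * PySem.Str.len content then false
      else if (PySem.Str.count content "." : Int) * 10 > PySem.Str.len content then false
      else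
        let hex_like : Int :=
          content.toList.foldl (fun acc c => if pvHexChar c then acc + 1 else acc) 0
        if 0 < PySem.Str.len content ∧ hex_like * 10 > 7 * PySem.Str.len content then false
        else
          let vowels : Int :=
            (PySem.Str.lower content).toList.foldl (fun acc c => if pvVowelChar c then acc + 1 else acc) 0
          if 0 < PySem.Str.len content ∧ vowels * 10 < PySem.Str.len content then false
          else true

-- ===== PORT B =====
-- the single-pass accumulator step of Source B's loop body
def pvAltStep : (Int × Int × Int × Int × Int × Int × Int) → Char → (Int × Int × Int × Int × Int × Int × Int)
  | (braces, brackets, quotes, special, dots, hexd, vowels), c =>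
    (if c == '{' then braces + 1 else braces,
     if c == '[' then brackets + 1 else brackets,
     if c == '"' then quotes + 1 else quotes,
     if pvSpecialChar c then special + 1 else special,
     if c == '.' then dots + 1 else dots,
     if pvHexChar c then hexd + 1 else hexd,
     if pvVowelChar (PySem.Chars.lowerChar c) then vowels + 1 else vowels)

def is_interesting_text_alt (content : String) (file_type : String) : Bool :=
  if content == "" || file_type != "text" then false
  else
    let n : Int := PySem.Str.len content
    if n < 20 then false
    else
      match content.toList.foldl pvAltStep (0, 0, 0, 0, 0, 0, 0) with
      | (braces, brackets, quotes, special, dots, hexd, vowels) =>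
        if braces + brackets + PySem.Int.floordiv quotes 10 > 5 then false
        else if special * 10 > 3 * n then false
        else if dots * 10 > n then false
        else if hexd * 10 > 7 * n then false
        else if vowels * 10 < n then false
        else true

-- ===== PRECONDITION & SPEC =====
def Spec_is_interesting_text (content : String) (file_type : String) (out : Bool) : Prop := out = is_interesting_text_alt content file_type
instance (content : String) (file_type : String) (out : Bool) : Decidable (Spec_is_interesting_text content file_type out) := by unfold Spec_is_interesting_text; infer_instance

-- ===== CLAIM (what is proved, stated in full; the proofs are below) =====
def Claim_equal_is_interesting_text : Prop := ∀ (content : String) (file_type : String), Dom_is_interesting_text content file_type → Spec_is_interesting_text content file_type (is_interesting_text content file_type)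

-- ===== LEMMAS AND PROOFS =====

-- PySem.Chars.count on a single-character needle is List.count
theorem pv_count_go_singleton (c : Char) (l : List Char) :
    ∀ (fuel acc : ℕ), l.length ≤ fuel →
      PySem.Chars.count.go [c] fuel l acc = acc + l.count c := by
  induction l with
  | nil => intro fuel acc _; cases fuel <;> simp [PySem.Chars.count.go]
  | cons h t ih =>
    intro fuel acc hle
    cases fuel with
    | zero => simp at hle
    | succ f =>
      rw [PySem.Chars.count.go]
      by_cases hc : c = h
      · subst hc
        simp [List.isPrefixOf, ih f (acc + 1) (by simpa using hle)]
        ring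
      · simp [List.isPrefixOf, hc, Ne.symm hc, ih f acc (by simpa using hle)]

theorem pv_count_singleton (l : List Char) (c : Char) :
    PySem.Chars.count l [c] = l.count c := by
  simp [PySem.Chars.count, pv_count_go_singleton c l l.length 0 le_rfl]

-- the single scan of B computes exactly the seven per-character counts
theorem pv_foldl_altStep (l : List Char) :
    ∀ (b k q s d h v : Int),
      l.foldl pvAltStep (b, k, q, s, d, h, v) =
        (b + (l.count '{' : Int), k + (l.count '[' : Int), q + (l.count '"' : Int),
         s + (l.countP pvSpecialChar : Int), d + (l.count '.' : Int),
         h + (l.countP pvHexChar : Int),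
         v + (l.countP (fun c => pvVowelChar (PySem.Chars.lowerChar c)) : Int)) := by
  induction l with
  | nil => intro b k q s d h v; simp
  | cons x t ih =>
    intro b k q s d h v
    show List.foldl pvAltStep (pvAltStep (b, k, q, s, d, h, v) x) t = _
    rw [pvAltStep]
    rw [ih]
    simp only [List.count_cons, List.countP_cons, Prod.mk.injEq]
    refine ⟨?_, ?_, ?_, ?_, ?_, ?_, ?_⟩ <;> (split_ifs with hh <;> simp [hh] <;> omega)

-- ===== VERDICT (by name: the statement is the Claim_ definition above) =====
theorem is_interesting_text_spec : Claim_equal_is_interesting_text := by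
  unfold Claim_equal_is_interesting_text
  intro content file_type _
  unfold Spec_is_interesting_text
  unfold is_interesting_text is_interesting_text_alt
  by_cases h0 : (content == "" || file_type != "text") = true
  · simp only [h0, if_true]
  · rw [if_neg h0, if_neg h0]
    by_cases h1 : PySem.Str.len content < 20
    · simp only [h1, if_true]
    · have hn : (0 : Int) < PySem.Str.len content := by omega
      simp only [h1, pv_foldl_altStep, PySem.List.foldl_if_add_one,
        PySem.Str.count_eq, PySem.Str.toList_lower, PySem.Chars.lower,
        List.countP_map, Function.comp_def, zero_add, hn, true_and, if_false,
        show ("{" : String).toList = ['{'] from rfl,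
        show ("[" : String).toList = ['['] from rfl,
        show ("\"" : String).toList = ['"'] from rfl,
        show ("." : String).toList = ['.'] from rfl,
        pv_count_singleton]
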